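-- pv_equiv track=rewrite | github.com/pypi-data/pypi-mirror-126 | packages/autotrader/autotrader-0.5.1-py3-none-any.whl/autotrader/lib/indicators.py | rolling_signal_list
-- ===== SOURCE A (Python) =====
-- def rolling_signal_list(signals):
--         '''
--             Returns a list which maintains the previous signal, until a new
--             signal is given.
--
--             [0,1,0,0,0,-1,0,0,1,0,0] ->  [0,1,1,1,1,-1,-1,-1,1,1,1]
--
--         '''
--
--         rolling_signals = [0]
--         last_signal     = rolling_signals[0]
--
--         for i in range(1, len(signals)):
--             if signals[i] != 0:
--                 last_signal = signals[i]
--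
--             rolling_signals.append(last_signal)
--
--         return rolling_signals
-- ===== SOURCE B (Python) =====
-- def rolling_signal_list(signals):
--     n = len(signals)
--     if n == 0:
--         return [0]
--     # change-points: indices i >= 1 where a new nonzero signal appears
--     changes = [(i, signals[i]) for i in range(1, n) if signals[i] != 0]
--     first = changes[0][0] if changes else n
--     result = [0] * first
--     ends = [c[0] for c in changes[1:]] + [n]
--     for (idx, val), end in zip(changes, ends):
--         result += [val] * (end - idx)
--     return result
-- ===== Notes on version B (the rewrite author's own statement) =====
-- stated objective: alternative
-- what changed: B replaces A's per-element running-last-signal accumulator loop with a two-phase pass: it first collects the change-points (index, nonzero value) from positions 1..n-1, then builds the output by concatenating constant-filled segments between consecutive change-points (leading zeros up to the first change).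
import Mathlib
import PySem

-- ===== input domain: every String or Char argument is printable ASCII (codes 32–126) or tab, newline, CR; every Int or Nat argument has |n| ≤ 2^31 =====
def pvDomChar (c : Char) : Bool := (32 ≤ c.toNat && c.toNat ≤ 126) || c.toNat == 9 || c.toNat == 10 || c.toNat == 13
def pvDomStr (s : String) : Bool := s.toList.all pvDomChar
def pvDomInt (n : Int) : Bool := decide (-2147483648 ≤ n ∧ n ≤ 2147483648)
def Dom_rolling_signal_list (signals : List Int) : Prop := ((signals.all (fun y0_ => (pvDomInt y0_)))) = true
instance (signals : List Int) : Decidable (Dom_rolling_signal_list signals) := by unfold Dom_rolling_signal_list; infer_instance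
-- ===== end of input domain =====

-- B replaces A's per-element running-last-signal loop by a two-phase pass: collect
-- the change-points (index, value) first, then fill constant segments between
-- consecutive change-points; objective: alternative decomposition, same O(n) cost.


-- ===== PORT A =====
def rolling_signal_list (signals : List Int) : List Int :=
  ((PySem.List.pyRange 1 (signals.length : Int)).foldl
    (fun (st : List Int × Int) i =>
      let last := if PySem.List.pyGetD signals i 0 ≠ 0 then PySem.List.pyGetD signals i 0 else st.2
      (st.1 ++ [last], last))
    ([0], 0)).1

-- ===== PORT B =====
def rolling_signal_list_alt (signals : List Int) : List Int :=
  let n : Int := signals.length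
  if n = 0 then [0] else
    let changes : List (Int × Int) :=
      ((PySem.List.pyRange 1 n).filter
          (fun i => decide (PySem.List.pyGetD signals i 0 ≠ 0))).map
        (fun i => (i, PySem.List.pyGetD signals i 0))
    let first : Int := match changes with | [] => n | c :: _ => c.1
    let result : List Int := List.replicate first.toNat 0
    let ends : List Int := (changes.drop 1).map Prod.fst ++ [n]
    (changes.zip ends).foldl
      (fun res p => res ++ List.replicate (p.2 - p.1.1).toNat p.1.2) result

-- ===== PRECONDITION & SPEC =====
def Spec_rolling_signal_list (signals : List Int) (out : List Int) : Prop := out = rolling_signal_list_alt signals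
instance (signals : List Int) (out : List Int) : Decidable (Spec_rolling_signal_list signals out) := by unfold Spec_rolling_signal_list; infer_instance

-- ===== CLAIM (what is proved, stated in full; the proofs are below) =====
def Claim_equal_rolling_signal_list : Prop := ∀ (signals : List Int), Dom_rolling_signal_list signals → Spec_rolling_signal_list signals (rolling_signal_list signals)

-- ===== LEMMAS AND PROOFS =====

/-- Reference form: forward-fill `t` with running last nonzero value, seeded by `last`. -/
def pvRoll : Int → List Int → List Int
  | _, [] => []
  | last, x :: xs => let l := if x ≠ 0 then x else last; l :: pvRoll l xs

/-- Change-points of `t`, indexed from `i`. -/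
def pvChg : Int → List Int → List (Int × Int)
  | _, [] => []
  | i, x :: xs => if x ≠ 0 then (i, x) :: pvChg (i+1) xs else pvChg (i+1) xs

def pvFirst (cs : List (Int × Int)) (n : Int) : Int :=
  match cs with | [] => n | c :: _ => c.1

def pvFill (n : Int) (cs : List (Int × Int)) : List Int :=
  (cs.zip ((cs.drop 1).map Prod.fst ++ [n])).flatMap
    (fun p => List.replicate (p.2 - p.1.1).toNat p.1.2)

theorem pvRoll_foldl (t : List Int) (acc : List Int) (last : Int) :
    (t.foldl (fun (st : List Int × Int) x =>
        let l := if x ≠ 0 then x else st.2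
        (st.1 ++ [l], l)) (acc, last)).1 = acc ++ pvRoll last t := by
  induction t generalizing acc last with
  | nil => simp [pvRoll]
  | cons x xs ih =>
    simp only [List.foldl_cons]
    rw [ih]
    simp [pvRoll]

theorem pvFirst_ge (t : List Int) (i : Int) :
    i ≤ pvFirst (pvChg i t) (i + t.length) := by
  induction t generalizing i with
  | nil => simp [pvChg, pvFirst]
  | cons x xs ih =>
    simp only [pvChg, List.length_cons]
    split_ifs with h
    · simp [pvFirst]
    · have h2 := ih (i + 1)
      have e : i + (((xs.length + 1 : Nat)) : Int) = i + 1 + (xs.length : Int) := by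
        push_cast; ring
      rw [e]
      omega

theorem pvFill_cons (n i x : Int) (cs : List (Int × Int)) :
    pvFill n ((i, x) :: cs) =
      List.replicate (pvFirst cs n - i).toNat x ++ pvFill n cs := by
  cases cs with
  | nil => simp [pvFill, pvFirst]
  | cons c cs' => simp [pvFill, pvFirst]

theorem pvFill_roll (t : List Int) (i v : Int) :
    List.replicate (pvFirst (pvChg i t) (i + t.length) - i).toNat v
      ++ pvFill (i + t.length) (pvChg i t) = pvRoll v t := by
  induction t generalizing i v with
  | nil => simp [pvChg, pvFirst, pvFill, pvRoll]
  | cons x xs ih =>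
    have hn : i + ((x :: xs).length : Int) = (i + 1) + xs.length := by
      simp; ring
    have hge := pvFirst_ge xs (i + 1)
    have hsub : (pvFirst (pvChg (i+1) xs) ((i+1) + xs.length) - i).toNat
        = (pvFirst (pvChg (i+1) xs) ((i+1) + xs.length) - (i+1)).toNat + 1 := by
      omega
    by_cases h : x ≠ 0
    · simp only [pvChg, if_pos h, pvFirst, hn]
      rw [pvFill_cons, hsub, List.replicate_succ]
      simp only [Int.sub_self, Int.toNat_zero, List.replicate_zero, List.nil_append,
        List.cons_append]
      rw [ih (i+1) x]
      simp [pvRoll, h]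
    · simp only [pvChg, if_neg h, hn]
      rw [hsub, List.replicate_succ, List.cons_append, ih (i+1) v]
      simp only [ne_eq, not_not] at h
      simp [pvRoll, h]

theorem pvChg_pyRange (t : List Int) (a : Int) (f : Int → Int)
    (h : ∀ k : Nat, k < t.length → f (a + k) = t[k]!) :
    ((PySem.List.pyRange a (a + t.length)).filter
        (fun i => decide (f i ≠ 0))).map (fun i => (i, f i)) = pvChg a t := by
  induction t generalizing a with
  | nil => simp [pvChg]
  | cons x xs ih =>
    have hb : a + (((x :: xs).length : Nat) : Int) = (a + 1) + (xs.length : Int) := by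
      simp only [List.length_cons]; push_cast; ring
    have hfa : f a = x := by
      have := h 0 (by simp)
      simpa using this
    have hshift : ∀ k : Nat, k < xs.length → f ((a + 1) + k) = xs[k]! := by
      intro k hk
      have h1 : ((a + 1) + (k : Int)) = a + ((k + 1 : Nat) : Int) := by push_cast; ring
      rw [h1, h (k + 1) (by simpa using Nat.succ_lt_succ hk)]
      simp
    rw [hb, PySem.List.pyRange_one_cons (by omega), List.filter_cons]
    by_cases hx : x ≠ 0
    · rw [if_pos (by simp [hfa, hx]), List.map_cons, ih (a + 1) hshift, hfa]
      simp [pvChg, hx]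
    · simp only [ne_eq, not_not] at hx
      rw [if_neg (by simp [hfa, hx]), ih (a + 1) hshift]
      simp [pvChg, hx]

theorem pvA_eq_roll (signals : List Int) :
    rolling_signal_list signals = 0 :: pvRoll 0 (signals.drop 1) := by
  unfold rolling_signal_list
  rw [PySem.List.foldl_pyRange_pyGetD' signals 0
      (f := fun (st : List Int × Int) x =>
        let l := if x ≠ 0 then x else st.2
        (st.1 ++ [l], l)) ([0], 0) (by norm_num)]
  rw [pvRoll_foldl]
  simp

-- ===== VERDICT (by name: the statement is the Claim_ definition above) =====
theorem rolling_signal_list_spec : Claim_equal_rolling_signal_list := by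
  intro signals _
  unfold Spec_rolling_signal_list
  rw [pvA_eq_roll]
  cases signals with
  | nil => simp [rolling_signal_list_alt, pvRoll]
  | cons x xs =>
    unfold rolling_signal_list_alt
    simp only [List.length_cons]
    have hne : ¬ (((xs.length + 1 : Nat) : Int) = 0) := by push_cast; omega
    rw [if_neg hne]
    have hget : ∀ k : Nat, k < xs.length →
        PySem.List.pyGetD (x :: xs) (1 + k) 0 = xs[k]! := by
      intro k hk
      rw [PySem.List.pyGetD_of_nonneg (x :: xs) 0 (by omega)]
      have h1 : ((1 : Int) + k).toNat = k + 1 := by omega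
      rw [h1, List.getD_cons_succ]
      simp [List.getD_eq_getElem?_getD, List.getElem!_eq_getElem?_getD]
    have hn : ((xs.length + 1 : Nat) : Int) = 1 + (xs.length : Int) := by push_cast; ring
    rw [hn, pvChg_pyRange xs 1 (fun i => PySem.List.pyGetD (x :: xs) i 0) hget]
    rw [PySem.List.foldl_append_eq_flatMap]
    have hfirst : (match pvChg 1 xs with | [] => 1 + (xs.length : Int) | c :: _ => c.1)
        = pvFirst (pvChg 1 xs) (1 + xs.length) := by
      cases pvChg 1 xs <;> rfl
    rw [hfirst]
    have hge := pvFirst_ge xs 1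
    have hrep : (pvFirst (pvChg 1 xs) (1 + (xs.length : Int))).toNat
        = 1 + (pvFirst (pvChg 1 xs) (1 + (xs.length : Int)) - 1).toNat := by omega
    rw [hrep, List.replicate_add, List.replicate_one, List.cons_append, List.nil_append]
    simp only [List.drop_succ_cons, List.drop_zero]
    rw [← pvFill_roll xs 1 0]
    simp [pvFill]
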